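-- pv_equiv track=rewrite | github.com/Dhivyaganapathi/Altruisty-Codecraft-Challenge | Challenge - 2.py | bees_between_flowers
-- ===== SOURCE A (Python) =====
-- def bees_between_flowers(s, startIndex, endIndex):
--     n = len(s)
--     bee_count_prefix = [0] * (n + 1)
--
--     left_flower = [-1] * n
--     right_flower = [-1] * n
--
--     for i in range(n):
--         bee_count_prefix[i + 1] = bee_count_prefix[i] + (1 if s[i] == '*' else 0)
--
--     last_flower = -1
--     for i in range(n):
--         if s[i] == '|':
--             last_flower = i
--         left_flower[i] = last_flower
--     last_flower = -1
--     for i in range(n - 1, -1, -1):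
--         if s[i] == '|':
--             last_flower = i
--         right_flower[i] = last_flower
--
--     results = []
--     for i in range(len(startIndex)):
--         start = startIndex[i] - 1
--         end = endIndex[i] - 1
--
--         left_bound = right_flower[start]
--         right_bound = left_flower[end]
--         if left_bound != -1 and right_bound != -1 and left_bound < right_bound:
--             bees_count = bee_count_prefix[right_bound + 1] - bee_count_prefix[left_bound + 1]
--             results.append(bees_count)
--         else:
--             results.append(0)
--
--     return results
-- ===== SOURCE B (Python) =====
-- def bees_between_flowers(s, startIndex, endIndex):
--     n = len(s)
--
--     left_flower = []
--     last = -1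
--     for i in range(n):
--         if s[i] == '|':
--             last = i
--         left_flower.append(last)
--
--     right_flower = [-1] * n
--     last = -1
--     for i in range(n - 1, -1, -1):
--         if s[i] == '|':
--             last = i
--         right_flower[i] = last
--
--     results = []
--     for st, en in zip(startIndex, endIndex):
--         lb = right_flower[st - 1]
--         rb = left_flower[en - 1]
--         results.append(s[lb + 1:rb + 1].count('*')
--                        if lb != -1 and rb != -1 and lb < rb else 0)
--     return results
-- ===== Notes on version B (the rewrite author's own statement) =====
-- stated objective: simpler
-- what changed: B drops A's bee_count_prefix table entirely and instead counts '*' directly in the enclosed slice s[left_bound+1:right_bound+1] per query, builds left_flower by appending the running last-flower value instead of preallocating and index-assigning, and iterates queries with zip instead of range/indexing.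
import Mathlib
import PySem

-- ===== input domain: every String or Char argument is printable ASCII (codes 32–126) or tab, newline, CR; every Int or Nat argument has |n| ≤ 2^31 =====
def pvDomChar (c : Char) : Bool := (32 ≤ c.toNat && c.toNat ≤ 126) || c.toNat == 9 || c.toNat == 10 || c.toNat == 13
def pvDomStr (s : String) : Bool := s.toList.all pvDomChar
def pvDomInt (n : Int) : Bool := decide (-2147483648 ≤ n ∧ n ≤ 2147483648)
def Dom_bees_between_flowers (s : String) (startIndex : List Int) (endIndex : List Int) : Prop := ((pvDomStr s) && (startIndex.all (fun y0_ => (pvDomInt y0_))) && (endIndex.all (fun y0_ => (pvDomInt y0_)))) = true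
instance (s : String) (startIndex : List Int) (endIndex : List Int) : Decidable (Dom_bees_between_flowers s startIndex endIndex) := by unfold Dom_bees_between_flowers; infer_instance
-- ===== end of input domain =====

-- B replaces A's prefix-sum table by a direct count over the enclosed slice per query
-- (objective: simpler — no speed claim); return-value equivalence wherever Python A returns.

-- ===== PORT A =====
-- the update of A's left/right nearest-flower loops: if s[i]=='|': last=i; arr[i]=last
def pvAStepFlower (cs : List Char) (st : Int × List Int) (i : Int) : Int × List Int :=
  let last := if PySem.List.pyGetD cs i ' ' == '|' then i else st.1
  (last, st.2.set i.toNat last)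

-- bee_count_prefix loop (all indices are in range here, so List.set / pyGetD are exact)
def pvA_bcp (cs : List Char) : List Int :=
  (PySem.List.pyRange 0 (cs.length : Int) 1).foldl
    (fun acc i => acc.set (i.toNat + 1)
      (PySem.List.pyGetD acc i 0 + (if PySem.List.pyGetD cs i ' ' == '*' then (1:Int) else 0)))
    (List.replicate (cs.length + 1) (0:Int))

def pvA_lf (cs : List Char) : List Int :=
  ((PySem.List.pyRange 0 (cs.length : Int) 1).foldl (pvAStepFlower cs)
    (-1, List.replicate cs.length (-1:Int))).2

def pvA_rf (cs : List Char) : List Int :=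
  ((PySem.List.pyRange ((cs.length : Int) - 1) (-1) (-1)).foldl (pvAStepFlower cs)
    (-1, List.replicate cs.length (-1:Int))).2

-- A's query-loop body: startIndex[i]-1 / endIndex[i]-1, the (negative-wrapping) array
-- lookups, the guard, and the prefix-table difference
def pvAQuery (bcp lf rf sI eI : List Int) (res : List Int) (i : Int) : List Int :=
  let start := PySem.List.pyGetD sI i 0 - 1
  let e := PySem.List.pyGetD eI i 0 - 1
  let lb := PySem.List.pyGetD rf start 0
  let rb := PySem.List.pyGetD lf e 0
  if lb ≠ -1 ∧ rb ≠ -1 ∧ lb < rb then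
    res ++ [PySem.List.pyGetD bcp (rb + 1) 0 - PySem.List.pyGetD bcp (lb + 1) 0]
  else
    res ++ [(0:Int)]

def bees_between_flowers (s : String) (startIndex : List Int) (endIndex : List Int) : List Int :=
  let cs := s.toList
  let bcp := pvA_bcp cs
  let lf := pvA_lf cs
  let rf := pvA_rf cs
  (PySem.List.pyRange 0 (startIndex.length : Int) 1).foldl
    (pvAQuery bcp lf rf startIndex endIndex) []

-- ===== PORT B =====
-- left_flower built by appending the running last-flower value
def pvBStepLeft (cs : List Char) (st : Int × List Int) (i : Int) : Int × List Int :=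
  let last := if PySem.List.pyGetD cs i ' ' == '|' then i else st.1
  (last, st.2 ++ [last])

-- right_flower backward loop (Source B keeps this loop as in A)
def pvBStepRight (cs : List Char) (st : Int × List Int) (i : Int) : Int × List Int :=
  let last := if PySem.List.pyGetD cs i ' ' == '|' then i else st.1
  (last, st.2.set i.toNat last)

def pvB_lf (cs : List Char) : List Int :=
  ((PySem.List.pyRange 0 (cs.length : Int) 1).foldl (pvBStepLeft cs) (-1, [])).2

def pvB_rf (cs : List Char) : List Int :=
  ((PySem.List.pyRange ((cs.length : Int) - 1) (-1) (-1)).foldl (pvBStepRight cs)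
    (-1, List.replicate cs.length (-1:Int))).2

-- B's query-loop body: s[lb+1:rb+1].count('*') ported as List.count on the slice
-- (exact: the needle is a single character)
def pvBQuery (cs : List Char) (lf rf : List Int) (res : List Int) (p : Int × Int) : List Int :=
  let lb := PySem.List.pyGetD rf (p.1 - 1) 0
  let rb := PySem.List.pyGetD lf (p.2 - 1) 0
  res ++ [if lb ≠ -1 ∧ rb ≠ -1 ∧ lb < rb then
            ((PySem.List.slice cs (some (lb + 1)) (some (rb + 1))).count '*' : Int)
          else 0]

def bees_between_flowers_alt (s : String) (startIndex : List Int) (endIndex : List Int) : List Int :=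
  let cs := s.toList
  let lf := pvB_lf cs
  let rf := pvB_rf cs
  (startIndex.zip endIndex).foldl (pvBQuery cs lf rf) []

-- ===== PRECONDITION & SPEC =====
-- Pre_ excludes exactly the inputs where Python A raises an IndexError: a query value whose
-- 1-based position falls outside Python's (negative-wrapping) index range of s, or a
-- startIndex longer than endIndex.
def Pre_bees_between_flowers (s : String) (startIndex : List Int) (endIndex : List Int) : Prop :=
  startIndex.length ≤ endIndex.length ∧
  (∀ a ∈ startIndex, PySem.Raise.InRange s.toList.length (a - 1)) ∧
  (∀ b ∈ endIndex.take startIndex.length, PySem.Raise.InRange s.toList.length (b - 1))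
instance (s : String) (startIndex : List Int) (endIndex : List Int) : Decidable (Pre_bees_between_flowers s startIndex endIndex) := by unfold Pre_bees_between_flowers; infer_instance

def pvWitness_bees_between_flowers : String × List Int × List Int := ("|*a*|b|*", [1, 2, 6], [5, 8, 8])

def Spec_bees_between_flowers (s : String) (startIndex : List Int) (endIndex : List Int) (out : List Int) : Prop := out = bees_between_flowers_alt s startIndex endIndex
instance (s : String) (startIndex : List Int) (endIndex : List Int) (out : List Int) : Decidable (Spec_bees_between_flowers s startIndex endIndex out) := by unfold Spec_bees_between_flowers; infer_instance

-- ===== CLAIM (what is proved, stated in full; the proofs are below) =====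
def Claim_equal_bees_between_flowers : Prop := ∀ (s : String) (startIndex : List Int) (endIndex : List Int), Dom_bees_between_flowers s startIndex endIndex → Pre_bees_between_flowers s startIndex endIndex → Spec_bees_between_flowers s startIndex endIndex (bees_between_flowers s startIndex endIndex)

-- ===== LEMMAS AND PROOFS =====

-- number of bees among the first k plants
def pvPC (cs : List Char) (k : Nat) : Int := ((cs.take k).count '*' : Int)

-- the per-query value A produces
def pvGA (cs : List Char) (sI eI : List Int) (i : Int) : Int :=
  if PySem.List.pyGetD (pvA_rf cs) (PySem.List.pyGetD sI i 0 - 1) 0 ≠ -1 ∧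
     PySem.List.pyGetD (pvA_lf cs) (PySem.List.pyGetD eI i 0 - 1) 0 ≠ -1 ∧
     PySem.List.pyGetD (pvA_rf cs) (PySem.List.pyGetD sI i 0 - 1) 0 <
       PySem.List.pyGetD (pvA_lf cs) (PySem.List.pyGetD eI i 0 - 1) 0 then
    PySem.List.pyGetD (pvA_bcp cs) (PySem.List.pyGetD (pvA_lf cs) (PySem.List.pyGetD eI i 0 - 1) 0 + 1) 0
      - PySem.List.pyGetD (pvA_bcp cs) (PySem.List.pyGetD (pvA_rf cs) (PySem.List.pyGetD sI i 0 - 1) 0 + 1) 0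
  else 0

-- the per-query value B produces
def pvGB (cs : List Char) (p : Int × Int) : Int :=
  if PySem.List.pyGetD (pvB_rf cs) (p.1 - 1) 0 ≠ -1 ∧
     PySem.List.pyGetD (pvB_lf cs) (p.2 - 1) 0 ≠ -1 ∧
     PySem.List.pyGetD (pvB_rf cs) (p.1 - 1) 0 < PySem.List.pyGetD (pvB_lf cs) (p.2 - 1) 0 then
    ((PySem.List.slice cs (some (PySem.List.pyGetD (pvB_rf cs) (p.1 - 1) 0 + 1))
        (some (PySem.List.pyGetD (pvB_lf cs) (p.2 - 1) 0 + 1))).count '*' : Int)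
  else 0

theorem pv_fold_map {α β : Type} (f : List β → α → List β) (u : α → β)
    (hf : ∀ acc x, f acc x = acc ++ [u x]) :
    ∀ (l : List α) (acc : List β), l.foldl f acc = acc ++ l.map u := by
  intro l
  induction l with
  | nil => intro acc; simp
  | cons x t ih => intro acc; simp [hf, ih]

theorem pvAQuery_eq (bcp lf rf sI eI : List Int) (res : List Int) (i : Int) :
    pvAQuery bcp lf rf sI eI res i = res ++
      [if PySem.List.pyGetD rf (PySem.List.pyGetD sI i 0 - 1) 0 ≠ -1 ∧
          PySem.List.pyGetD lf (PySem.List.pyGetD eI i 0 - 1) 0 ≠ -1 ∧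
          PySem.List.pyGetD rf (PySem.List.pyGetD sI i 0 - 1) 0 <
            PySem.List.pyGetD lf (PySem.List.pyGetD eI i 0 - 1) 0 then
        PySem.List.pyGetD bcp (PySem.List.pyGetD lf (PySem.List.pyGetD eI i 0 - 1) 0 + 1) 0
          - PySem.List.pyGetD bcp (PySem.List.pyGetD rf (PySem.List.pyGetD sI i 0 - 1) 0 + 1) 0
      else 0] := by
  by_cases h : PySem.List.pyGetD rf (PySem.List.pyGetD sI i 0 - 1) 0 ≠ -1 ∧
      PySem.List.pyGetD lf (PySem.List.pyGetD eI i 0 - 1) 0 ≠ -1 ∧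
      PySem.List.pyGetD rf (PySem.List.pyGetD sI i 0 - 1) 0 <
        PySem.List.pyGetD lf (PySem.List.pyGetD eI i 0 - 1) 0 <;>
    simp [pvAQuery, h]

theorem pv_set_append {α : Type} (P R : List α) (v : α) :
    (P ++ R).set P.length v = P ++ R.set 0 v := by
  induction P with
  | nil => rfl
  | cons x t ih => simp [ih]

theorem pv_bcp_inv (cs : List Char) : ∀ k : Nat, k ≤ cs.length →
    (PySem.List.pyRange 0 (k : Int) 1).foldl
      (fun acc i => acc.set (i.toNat + 1)
        (PySem.List.pyGetD acc i 0 + (if PySem.List.pyGetD cs i ' ' == '*' then (1:Int) else 0)))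
      (List.replicate (cs.length + 1) (0:Int))
    = (List.range (k + 1)).map (pvPC cs) ++ List.replicate (cs.length - k) (0:Int) := by
  intro k
  induction k with
  | zero =>
    intro _
    simp [PySem.List.pyRange_one_eq_nil, pvPC, List.replicate_succ]
  | succ k ih =>
    intro hk
    have hk' : k ≤ cs.length := by omega
    have hkc : ((k + 1 : Nat) : Int) = (k : Int) + 1 := by push_cast; ring
    rw [hkc, PySem.List.pyRange_one_succ_right (by positivity), List.foldl_append, ih hk']
    simp only [List.foldl_cons, List.foldl_nil]
    have hget : PySem.List.pyGetD
        ((List.range (k + 1)).map (pvPC cs) ++ List.replicate (cs.length - k) (0:Int)) (k : Int) 0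
        = pvPC cs k := by
      rw [PySem.List.pyGetD_natCast]
      rw [List.getD_eq_getElem _ _ (by simp; omega)]
      rw [List.getElem_append_left (by simp)]
      simp
    have hchar : PySem.List.pyGetD cs (k : Int) ' ' = cs[k]'(by omega) := by
      rw [PySem.List.pyGetD_natCast, List.getD_eq_getElem _ _ (by omega)]
    have hstep : pvPC cs k + (if PySem.List.pyGetD cs (k : Int) ' ' == '*' then (1:Int) else 0)
        = pvPC cs (k + 1) := by
      rw [hchar]
      unfold pvPC
      have htake : cs.take (k + 1) = cs.take k ++ [cs[k]'(by omega)] := by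
        rw [List.take_add_one, List.getElem?_eq_getElem (by omega)]
        rfl
      rw [htake, List.count_append]
      by_cases h : cs[k]'(by omega) = '*'
      · simp [h]
      · simp [h]
    rw [hget, hstep]
    have h1 : (k : Int).toNat + 1 = ((List.range (k + 1)).map (pvPC cs)).length := by simp
    rw [h1, pv_set_append]
    have h2 : cs.length - k = (cs.length - (k + 1)) + 1 := by omega
    rw [h2, List.replicate_succ]
    have h3 : List.range (k + 2) = List.range (k + 1) ++ [k + 1] := List.range_succ
    rw [h3]
    simp

theorem pv_bcp_eq (cs : List Char) : pvA_bcp cs = (List.range (cs.length + 1)).map (pvPC cs) := by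
  unfold pvA_bcp
  have := pv_bcp_inv cs cs.length le_rfl
  simpa using this

theorem pv_lf_inv (cs : List Char) : ∀ k : Nat, k ≤ cs.length →
    ((PySem.List.pyRange 0 (k : Int) 1).foldl (pvAStepFlower cs)
        (-1, List.replicate cs.length (-1:Int))).1
      = ((PySem.List.pyRange 0 (k : Int) 1).foldl (pvBStepLeft cs) (-1, [])).1 ∧
    ((PySem.List.pyRange 0 (k : Int) 1).foldl (pvBStepLeft cs) (-1, [])).2.length = k ∧
    ((PySem.List.pyRange 0 (k : Int) 1).foldl (pvAStepFlower cs)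
        (-1, List.replicate cs.length (-1:Int))).2
      = ((PySem.List.pyRange 0 (k : Int) 1).foldl (pvBStepLeft cs) (-1, [])).2
          ++ List.replicate (cs.length - k) (-1:Int) := by
  intro k
  induction k with
  | zero =>
    intro _
    refine ⟨rfl, rfl, by simp [PySem.List.pyRange_one_eq_nil]⟩
  | succ k ih =>
    intro hk
    obtain ⟨ih1, ih2, ih3⟩ := ih (by omega)
    have hkc : ((k + 1 : Nat) : Int) = (k : Int) + 1 := by push_cast; ring
    rw [hkc, PySem.List.pyRange_one_succ_right (by positivity)]
    simp only [List.foldl_append, List.foldl_cons, List.foldl_nil]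
    set SA := (PySem.List.pyRange 0 (k : Int) 1).foldl (pvAStepFlower cs)
      (-1, List.replicate cs.length (-1:Int)) with hSA
    set SB := (PySem.List.pyRange 0 (k : Int) 1).foldl (pvBStepLeft cs) (-1, ([] : List Int)) with hSB
    simp only [pvAStepFlower, pvBStepLeft, ih1]
    refine ⟨trivial, by simp [ih2], ?_⟩
    rw [ih3]
    have h1 : (k : Int).toNat = SB.2.length := by simp [ih2]
    rw [h1, pv_set_append]
    have h2 : cs.length - k = (cs.length - (k + 1)) + 1 := by omega
    rw [h2, List.replicate_succ]
    simp

theorem pv_lf_eq (cs : List Char) : pvA_lf cs = pvB_lf cs := by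
  unfold pvA_lf pvB_lf
  have h := (pv_lf_inv cs cs.length le_rfl).2.2
  simpa using h

theorem pv_rf_eq (cs : List Char) : pvB_rf cs = pvA_rf cs := rfl

theorem pv_step_len (cs : List Char) : ∀ (l : List Int) (st : Int × List Int),
    ((l.foldl (pvAStepFlower cs) st).2).length = st.2.length := by
  intro l
  induction l with
  | nil => intro st; rfl
  | cons x t ih =>
    intro st
    simp only [List.foldl_cons, ih, pvAStepFlower, List.length_set]

theorem pv_step_mem (cs : List Char) (n : Int) : ∀ (l : List Int) (st : Int × List Int),
    (∀ i ∈ l, 0 ≤ i ∧ i < n) →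
    (st.1 = -1 ∨ (0 ≤ st.1 ∧ st.1 < n)) →
    (∀ x ∈ st.2, x = -1 ∨ (0 ≤ x ∧ x < n)) →
    ∀ x ∈ (l.foldl (pvAStepFlower cs) st).2, x = -1 ∨ (0 ≤ x ∧ x < n) := by
  intro l
  induction l with
  | nil => intro st _ _ harr; simpa using harr
  | cons x t ih =>
    intro st hl hlast harr
    simp only [List.foldl_cons]
    have hx : 0 ≤ x ∧ x < n := hl x (by simp)
    have hlast' : (pvAStepFlower cs st x).1 = -1 ∨ (0 ≤ (pvAStepFlower cs st x).1 ∧ (pvAStepFlower cs st x).1 < n) := by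
      unfold pvAStepFlower
      split
      · exact Or.inr hx
      · exact hlast
    refine ih (pvAStepFlower cs st x) (fun i hi => hl i (by simp [hi])) hlast' ?_
    intro y hy
    unfold pvAStepFlower at hy
    simp only at hy
    rcases List.mem_or_eq_of_mem_set hy with h | h
    · exact harr y h
    · subst h
      split
      · exact Or.inr hx
      · exact hlast

theorem pv_lf_len (cs : List Char) : (pvA_lf cs).length = cs.length := by
  unfold pvA_lf; rw [pv_step_len]; simp

theorem pv_rf_len (cs : List Char) : (pvA_rf cs).length = cs.length := by
  unfold pvA_rf; rw [pv_step_len]; simp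

theorem pv_lf_mem (cs : List Char) : ∀ x ∈ pvA_lf cs, x = -1 ∨ (0 ≤ x ∧ x < (cs.length : Int)) := by
  unfold pvA_lf
  apply pv_step_mem
  · intro i hi
    rw [PySem.List.mem_pyRange_one] at hi
    omega
  · exact Or.inl rfl
  · intro x hx
    exact Or.inl (List.eq_of_mem_replicate hx)

theorem pv_rf_mem (cs : List Char) : ∀ x ∈ pvA_rf cs, x = -1 ∨ (0 ≤ x ∧ x < (cs.length : Int)) := by
  unfold pvA_rf
  apply pv_step_mem
  · intro i hi
    rw [PySem.List.mem_pyRange_neg_one] at hi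
    omega
  · exact Or.inl rfl
  · intro x hx
    exact Or.inl (List.eq_of_mem_replicate hx)

theorem pv_count_diff (cs : List Char) (j k : Nat) (hjk : j ≤ k) :
    (((cs.drop j).take (k - j)).count '*' : Int) = pvPC cs k - pvPC cs j := by
  have h : cs.take k = cs.take j ++ (cs.drop j).take (k - j) := by
    rw [← List.take_add]
    congr 1
    omega
  unfold pvPC
  rw [h, List.count_append]
  push_cast
  ring

-- one query: A's prefix-table difference equals B's direct count on the enclosed slice
theorem pv_query_core (cs : List Char) (lb rb : Int)
    (hlb : lb = -1 ∨ (0 ≤ lb ∧ lb < (cs.length : Int)))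
    (hrb : rb = -1 ∨ (0 ≤ rb ∧ rb < (cs.length : Int))) :
    (if lb ≠ -1 ∧ rb ≠ -1 ∧ lb < rb then
       PySem.List.pyGetD (pvA_bcp cs) (rb + 1) 0 - PySem.List.pyGetD (pvA_bcp cs) (lb + 1) 0
     else (0:Int))
    = (if lb ≠ -1 ∧ rb ≠ -1 ∧ lb < rb then
        ((PySem.List.slice cs (some (lb + 1)) (some (rb + 1))).count '*' : Int)
       else 0) := by
  by_cases hg : lb ≠ -1 ∧ rb ≠ -1 ∧ lb < rb
  · obtain ⟨h1, h2, h3⟩ := hg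
    have hlb' : 0 ≤ lb ∧ lb < (cs.length : Int) := hlb.resolve_left h1
    have hrb' : 0 ≤ rb ∧ rb < (cs.length : Int) := hrb.resolve_left h2
    rw [if_pos ⟨h1, h2, h3⟩, if_pos ⟨h1, h2, h3⟩, pv_bcp_eq]
    rw [PySem.List.pyGetD_eq_getElem (i := rb + 1) ((List.range (cs.length + 1)).map (pvPC cs)) 0
      (by omega) (by simp; omega)]
    rw [PySem.List.pyGetD_eq_getElem (i := lb + 1) ((List.range (cs.length + 1)).map (pvPC cs)) 0
      (by omega) (by simp; omega)]
    simp only [List.getElem_map, List.getElem_range]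
    rw [PySem.List.slice_toNat cs (by omega) (by omega)]
    rw [pv_count_diff cs ((lb + 1).toNat) ((rb + 1).toNat) (by omega)]
  · rw [if_neg hg, if_neg hg]

-- ===== VERDICT (by name: the statement is the Claim_ definition above) =====
theorem bees_between_flowers_spec : Claim_equal_bees_between_flowers := by
  intro s sI eI _ hpre
  obtain ⟨hlen, hsI, heI⟩ := hpre
  unfold Spec_bees_between_flowers
  simp only [bees_between_flowers, bees_between_flowers_alt]
  have hA : ∀ (acc : List Int) (i : Int),
      pvAQuery (pvA_bcp s.toList) (pvA_lf s.toList) (pvA_rf s.toList) sI eI acc i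
        = acc ++ [pvGA s.toList sI eI i] := by
    intro acc i
    rw [pvAQuery_eq]
    rfl
  have hB : ∀ (acc : List Int) (p : Int × Int),
      pvBQuery s.toList (pvB_lf s.toList) (pvB_rf s.toList) acc p = acc ++ [pvGB s.toList p] := by
    intro acc p
    rfl
  rw [pv_fold_map _ _ hA, pv_fold_map _ _ hB]
  simp only [List.nil_append]
  apply List.ext_getElem
  · simp [PySem.List.length_pyRange_one]
    omega
  · intro k hk1 hk2
    have hk : k < sI.length := by
      simpa [PySem.List.length_pyRange_one] using hk1
    have hke : k < eI.length := lt_of_lt_of_le hk hlen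
    simp only [List.getElem_map]
    rw [PySem.List.getElem_pyRange_one, List.getElem_zip]
    simp only [zero_add]
    unfold pvGA pvGB
    have e1 : PySem.List.pyGetD sI (k : Int) 0 = sI[k] := by
      rw [PySem.List.pyGetD_natCast]
      exact List.getD_eq_getElem _ _ hk
    have e2 : PySem.List.pyGetD eI (k : Int) 0 = eI[k] := by
      rw [PySem.List.pyGetD_natCast]
      exact List.getD_eq_getElem _ _ hke
    simp only [pv_rf_eq, ← pv_lf_eq, e1, e2]
    have ha : PySem.Raise.InRange s.toList.length (sI[k] - 1) :=
      hsI _ (List.getElem_mem hk)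
    have hbmem : eI[k] ∈ eI.take sI.length := by
      have h1 : k < (eI.take sI.length).length := by simp; omega
      have h2 : (eI.take sI.length)[k]'h1 = eI[k] := List.getElem_take
      rw [← h2]
      exact List.getElem_mem h1
    have hb : PySem.Raise.InRange s.toList.length (eI[k] - 1) := heI _ hbmem
    have hlb : PySem.List.pyGetD (pvA_rf s.toList) (sI[k] - 1) 0 ∈ pvA_rf s.toList := by
      apply PySem.List.pyGetD_mem
      rw [pv_rf_len]
      exact ha
    have hrb : PySem.List.pyGetD (pvA_lf s.toList) (eI[k] - 1) 0 ∈ pvA_lf s.toList := by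
      apply PySem.List.pyGetD_mem
      rw [pv_lf_len]
      exact hb
    exact pv_query_core s.toList _ _ (pv_rf_mem s.toList _ hlb) (pv_lf_mem s.toList _ hrb)
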